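-- pv_equiv track=rewrite | github.com/sainikhil4533/Student_Retention | src/api/routes/admin_imports.py | _validate_institution_contract_columns
-- ===== SOURCE A (Python) =====
-- ATTENDANCE_COLUMN_ALIASES = {
--     "Overall%": {"Overall%", "OverallPer", "OverallPercent", "OverallAttendancePercent"},
--     "Subject%": {"Subject%", "SubjectPer", "SubjectPercent", "SubjectAttendancePercent"},
--     "SubjectCode": {"SubjectCode", "SubjectCo"},
--     "shortname": {"shortname", "SubjectName", "Subject"},
-- }
--
-- def _validate_institution_contract_columns(sheets: dict[str, list[dict]]) -> dict[str, set[str]]: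
--     missing: dict[str, set[str]] = {}
--     base_required = {
--         "Admissions": {"registerno", "Branch", "Batch", "Gender", "AgeBand", "Attempts"},
--         "Registration": {"registerno", "Semester", "FinalStatus"},
--         "AttendancePolicy": {
--             "InstitutionName",
--             "OverallMinPercent",
--             "SubjectMinPercent",
--             "RGradeBelowPercent",
--             "IGradeMinPercent",
--             "IGradeMaxPercent",
--         },
--         "SubjectCatalog": {
--             "InstitutionName",
--             "Branch",
--             "Year",
--             "Semester",
--             "SubjectCode",
--             "SubjectName",
--         },
--         "Attendance": {"registerno", "Semester", "Overall%", "Subject%"},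
--     }
--     for sheet, required in base_required.items():
--         rows = sheets.get(sheet, [])
--         if not rows:
--             continue
--         present = {str(key).strip() for key in rows[0].keys()}
--         missing_columns: set[str] = set()
--         for column_name in required:
--             aliases = ATTENDANCE_COLUMN_ALIASES.get(column_name, {column_name}) if sheet == "Attendance" else {column_name}
--             if not any(alias in present for alias in aliases):
--                 missing_columns.add(column_name)
--         if sheet == "Attendance" and not any(
--             alias in present for alias in (ATTENDANCE_COLUMN_ALIASES["SubjectCode"] | ATTENDANCE_COLUMN_ALIASES["shortname"])
--         ):
--             missing_columns.add("SubjectCode or shortname")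
--         if missing_columns:
--             missing[sheet] = missing_columns
--     optional_support_rows = sheets.get("SupportMapping", [])
--     if optional_support_rows:
--         present = {str(key).strip() for key in optional_support_rows[0].keys()}
--         optional_required = {
--             "registerno",
--             "student_email",
--             "faculty_name",
--             "faculty_email",
--             "counsellor_name",
--             "counsellor_email",
--         }
--         missing_columns = optional_required - present
--         if missing_columns:
--             missing["SupportMapping"] = missing_columns
--     return missing
-- ===== SOURCE B (Python) =====
-- # B: one flat requirement table (sheet, column, aliases) -- including the combined
-- # "SubjectCode or shortname" requirement and the optional SupportMapping sheet as
-- # ordinary rows -- plus a headers map precomputed once; a single loop over the table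
-- # accumulates missing columns with setdefault, replacing A's nested per-sheet /
-- # per-column loops, the alias-dict lookups and the separate SupportMapping block.
--
-- _REQUIREMENTS = [
--     ("Admissions", "registerno", ("registerno",)),
--     ("Admissions", "Branch", ("Branch",)),
--     ("Admissions", "Batch", ("Batch",)),
--     ("Admissions", "Gender", ("Gender",)),
--     ("Admissions", "AgeBand", ("AgeBand",)),
--     ("Admissions", "Attempts", ("Attempts",)),
--     ("Registration", "registerno", ("registerno",)),
--     ("Registration", "Semester", ("Semester",)),
--     ("Registration", "FinalStatus", ("FinalStatus",)),
--     ("AttendancePolicy", "InstitutionName", ("InstitutionName",)),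
--     ("AttendancePolicy", "OverallMinPercent", ("OverallMinPercent",)),
--     ("AttendancePolicy", "SubjectMinPercent", ("SubjectMinPercent",)),
--     ("AttendancePolicy", "RGradeBelowPercent", ("RGradeBelowPercent",)),
--     ("AttendancePolicy", "IGradeMinPercent", ("IGradeMinPercent",)),
--     ("AttendancePolicy", "IGradeMaxPercent", ("IGradeMaxPercent",)),
--     ("SubjectCatalog", "InstitutionName", ("InstitutionName",)),
--     ("SubjectCatalog", "Branch", ("Branch",)),
--     ("SubjectCatalog", "Year", ("Year",)),
--     ("SubjectCatalog", "Semester", ("Semester",)),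
--     ("SubjectCatalog", "SubjectCode", ("SubjectCode",)),
--     ("SubjectCatalog", "SubjectName", ("SubjectName",)),
--     ("Attendance", "registerno", ("registerno",)),
--     ("Attendance", "Semester", ("Semester",)),
--     ("Attendance", "Overall%", ("Overall%", "OverallPer", "OverallPercent", "OverallAttendancePercent")),
--     ("Attendance", "Subject%", ("Subject%", "SubjectPer", "SubjectPercent", "SubjectAttendancePercent")),
--     ("Attendance", "SubjectCode or shortname", ("SubjectCode", "SubjectCo", "shortname", "SubjectName", "Subject")),
--     ("SupportMapping", "registerno", ("registerno",)),
--     ("SupportMapping", "student_email", ("student_email",)),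
--     ("SupportMapping", "faculty_name", ("faculty_name",)),
--     ("SupportMapping", "faculty_email", ("faculty_email",)),
--     ("SupportMapping", "counsellor_name", ("counsellor_name",)),
--     ("SupportMapping", "counsellor_email", ("counsellor_email",)),
-- ]
--
--
-- def _validate_institution_contract_columns(sheets: dict[str, list[dict]]) -> dict[str, set[str]]:
--     headers = {
--         name: ({str(key).strip() for key in rows[0].keys()} if rows else None)
--         for name, rows in sheets.items()
--     }
--     missing: dict[str, set[str]] = {}
--     for sheet, column, aliases in _REQUIREMENTS:
--         header = headers.get(sheet)
--         if header is not None and header.isdisjoint(aliases):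
--             missing.setdefault(sheet, set()).add(column)
--     return missing
-- ===== Notes on version B (the rewrite author's own statement) =====
-- stated objective: alternative
-- what changed: B flattens A's nested per-sheet/per-column loops, alias-dict lookups and separate SupportMapping block into one data table of (sheet, column, aliases) requirement triples driven by a single loop over a precomputed headers map, accumulating missing columns with setdefault.
import Mathlib
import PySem

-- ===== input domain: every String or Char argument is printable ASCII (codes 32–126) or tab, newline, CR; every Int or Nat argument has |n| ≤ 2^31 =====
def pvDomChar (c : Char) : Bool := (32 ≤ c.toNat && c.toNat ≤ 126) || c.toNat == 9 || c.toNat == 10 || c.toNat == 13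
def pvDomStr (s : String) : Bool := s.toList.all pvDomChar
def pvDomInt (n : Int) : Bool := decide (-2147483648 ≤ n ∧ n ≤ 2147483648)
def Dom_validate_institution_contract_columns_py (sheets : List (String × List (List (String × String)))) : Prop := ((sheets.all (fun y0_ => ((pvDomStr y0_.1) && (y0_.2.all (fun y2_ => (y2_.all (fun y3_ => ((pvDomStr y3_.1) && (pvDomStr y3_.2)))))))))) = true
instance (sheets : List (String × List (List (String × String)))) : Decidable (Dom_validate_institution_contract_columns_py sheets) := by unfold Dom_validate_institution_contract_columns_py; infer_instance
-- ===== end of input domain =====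

-- B replaces A's nested per-sheet/per-column loops, alias-dict lookups and separate
-- SupportMapping block by one flat (sheet, column, aliases) requirement table driven by a
-- single loop over a precomputed headers map (objective: alternative decomposition; no speed claim).

-- ===== PORT A =====
-- ATTENDANCE_COLUMN_ALIASES
def aAttAliases : PySem.Dict String (PySem.Set String) := PySem.Dict.mk [
  ("Overall%", PySem.Set.ofList ["Overall%", "OverallPer", "OverallPercent", "OverallAttendancePercent"]),
  ("Subject%", PySem.Set.ofList ["Subject%", "SubjectPer", "SubjectPercent", "SubjectAttendancePercent"]),
  ("SubjectCode", PySem.Set.ofList ["SubjectCode", "SubjectCo"]),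
  ("shortname", PySem.Set.ofList ["shortname", "SubjectName", "Subject"])]

-- base_required (dict literal, insertion order)
def aBaseRequired : List (String × PySem.Set String) := [
  ("Admissions", PySem.Set.ofList ["registerno", "Branch", "Batch", "Gender", "AgeBand", "Attempts"]),
  ("Registration", PySem.Set.ofList ["registerno", "Semester", "FinalStatus"]),
  ("AttendancePolicy", PySem.Set.ofList ["InstitutionName", "OverallMinPercent", "SubjectMinPercent", "RGradeBelowPercent", "IGradeMinPercent", "IGradeMaxPercent"]),
  ("SubjectCatalog", PySem.Set.ofList ["InstitutionName", "Branch", "Year", "Semester", "SubjectCode", "SubjectName"]),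
  ("Attendance", PySem.Set.ofList ["registerno", "Semester", "Overall%", "Subject%"])]

-- loop body for one sheet with a non-empty rows list (row0 = rows[0]):
-- the per-column alias loop plus the "SubjectCode or shortname" check
def aSheetMissing (sheet : String) (required : PySem.Set String)
    (row0 : List (String × String)) : PySem.Set String :=
  let present : PySem.Set String :=
    PySem.Set.ofList (((PySem.Dict.mk row0).keys).map PySem.Str.strip)
  let mc := required.foldl (fun mc col =>
    let aliases := if sheet == "Attendance"
      then PySem.Dict.getD aAttAliases col (PySem.Set.ofList [col])
      else PySem.Set.ofList [col]
    if aliases.any (fun a => PySem.Set.contains present a) then mc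
    else PySem.Set.add mc col) PySem.Set.empty
  if sheet == "Attendance" &&
      !((PySem.Set.union (PySem.Dict.getD aAttAliases "SubjectCode" PySem.Set.empty)
          (PySem.Dict.getD aAttAliases "shortname" PySem.Set.empty)).any
        (fun a => PySem.Set.contains present a))
    then PySem.Set.add mc "SubjectCode or shortname" else mc

def validate_institution_contract_columns_py (sheets : List (String × List (List (String × String)))) : List (String × List String) :=
  let missing : List (String × List String) := aBaseRequired.foldl (fun missing sr =>
    match PySem.Dict.getD (PySem.Dict.mk sheets) sr.1 [] with
    | [] => missing                       -- if not rows: continue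
    | row0 :: _ =>
      let mc := aSheetMissing sr.1 sr.2 row0
      if mc.isEmpty then missing else missing ++ [(sr.1, mc)]) []
  match PySem.Dict.getD (PySem.Dict.mk sheets) "SupportMapping" [] with
  | [] => missing
  | row0 :: _ =>
    let present : PySem.Set String :=
      PySem.Set.ofList (((PySem.Dict.mk row0).keys).map PySem.Str.strip)
    let mc := PySem.Set.diff (PySem.Set.ofList
      ["registerno", "student_email", "faculty_name", "faculty_email", "counsellor_name", "counsellor_email"]) present
    if mc.isEmpty then missing else missing ++ [("SupportMapping", mc)]

-- ===== PORT B =====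
-- _REQUIREMENTS: one flat table of (sheet, column, aliases)
def bRequirements : List (String × String × List String) := [
  ("Admissions", "registerno", ["registerno"]),
  ("Admissions", "Branch", ["Branch"]),
  ("Admissions", "Batch", ["Batch"]),
  ("Admissions", "Gender", ["Gender"]),
  ("Admissions", "AgeBand", ["AgeBand"]),
  ("Admissions", "Attempts", ["Attempts"]),
  ("Registration", "registerno", ["registerno"]),
  ("Registration", "Semester", ["Semester"]),
  ("Registration", "FinalStatus", ["FinalStatus"]),
  ("AttendancePolicy", "InstitutionName", ["InstitutionName"]),
  ("AttendancePolicy", "OverallMinPercent", ["OverallMinPercent"]),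
  ("AttendancePolicy", "SubjectMinPercent", ["SubjectMinPercent"]),
  ("AttendancePolicy", "RGradeBelowPercent", ["RGradeBelowPercent"]),
  ("AttendancePolicy", "IGradeMinPercent", ["IGradeMinPercent"]),
  ("AttendancePolicy", "IGradeMaxPercent", ["IGradeMaxPercent"]),
  ("SubjectCatalog", "InstitutionName", ["InstitutionName"]),
  ("SubjectCatalog", "Branch", ["Branch"]),
  ("SubjectCatalog", "Year", ["Year"]),
  ("SubjectCatalog", "Semester", ["Semester"]),
  ("SubjectCatalog", "SubjectCode", ["SubjectCode"]),
  ("SubjectCatalog", "SubjectName", ["SubjectName"]),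
  ("Attendance", "registerno", ["registerno"]),
  ("Attendance", "Semester", ["Semester"]),
  ("Attendance", "Overall%", ["Overall%", "OverallPer", "OverallPercent", "OverallAttendancePercent"]),
  ("Attendance", "Subject%", ["Subject%", "SubjectPer", "SubjectPercent", "SubjectAttendancePercent"]),
  ("Attendance", "SubjectCode or shortname", ["SubjectCode", "SubjectCo", "shortname", "SubjectName", "Subject"]),
  ("SupportMapping", "registerno", ["registerno"]),
  ("SupportMapping", "student_email", ["student_email"]),
  ("SupportMapping", "faculty_name", ["faculty_name"]),
  ("SupportMapping", "faculty_email", ["faculty_email"]),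
  ("SupportMapping", "counsellor_name", ["counsellor_name"]),
  ("SupportMapping", "counsellor_email", ["counsellor_email"])]

-- "{str(key).strip() for key in rows[0].keys()} if rows else None"
def bHeader (rows : List (List (String × String))) : Option (PySem.Set String) :=
  match rows with
  | [] => none
  | row0 :: _ => some (PySem.Set.ofList (((PySem.Dict.mk row0).keys).map PySem.Str.strip))

-- the headers comprehension over sheets.items()
def bHeaders (sheets : List (String × List (List (String × String)))) : PySem.Dict String (Option (PySem.Set String)) :=
  PySem.Dict.mk (((PySem.Dict.mk sheets).items).map (fun p => (p.1, bHeader p.2)))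

def validate_institution_contract_columns_py_alt (sheets : List (String × List (List (String × String)))) : List (String × List String) :=
  let headers := bHeaders sheets
  (bRequirements.foldl (fun missing r =>
    match PySem.Dict.getD headers r.1 none with
    | none => missing
    | some header =>
      if PySem.Set.isdisjoint header r.2.2 then
        PySem.Dict.insert missing r.1 (PySem.Set.add (PySem.Dict.getD missing r.1 PySem.Set.empty) r.2.1)
      else missing) PySem.Dict.empty).items

-- ===== PRECONDITION & SPEC =====
def Spec_validate_institution_contract_columns_py (sheets : List (String × List (List (String × String)))) (out : List (String × List String)) : Prop := out = validate_institution_contract_columns_py_alt sheets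
instance (sheets : List (String × List (List (String × String)))) (out : List (String × List String)) : Decidable (Spec_validate_institution_contract_columns_py sheets out) := by unfold Spec_validate_institution_contract_columns_py; infer_instance

-- ===== CLAIM (what is proved, stated in full; the proofs are below) =====
def Claim_equal_validate_institution_contract_columns_py : Prop := ∀ (sheets : List (String × List (List (String × String)))), Dom_validate_institution_contract_columns_py sheets → Spec_validate_institution_contract_columns_py sheets (validate_institution_contract_columns_py sheets)

-- ===== LEMMAS AND PROOFS =====

-- --- shared notation ---
def rowsOf (sheets : List (String × List (List (String × String)))) (s : String) : List (List (String × String)) :=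
  PySem.Dict.getD (PySem.Dict.mk sheets) s []

def presentOf (row0 : List (String × String)) : PySem.Set String :=
  PySem.Set.ofList (((PySem.Dict.mk row0).keys).map PySem.Str.strip)

-- B's loop body as a named function (definitionally the port's lambda)
def bStep (sheets : List (String × List (List (String × String))))
    (missing : PySem.Dict String (PySem.Set String)) (r : String × String × List String) :
    PySem.Dict String (PySem.Set String) :=
  match PySem.Dict.getD (bHeaders sheets) r.1 none with
  | none => missing
  | some header =>
    if PySem.Set.isdisjoint header r.2.2 then
      PySem.Dict.insert missing r.1 (PySem.Set.add (PySem.Dict.getD missing r.1 PySem.Set.empty) r.2.1)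
    else missing

def bGap (h : PySem.Set String) (cols : List (String × List String)) : List String :=
  (cols.filter (fun c => PySem.Set.isdisjoint h c.2)).map Prod.fst

def bPiece (sheets : List (String × List (List (String × String)))) (s : String)
    (cols : List (String × List String)) : List (String × List String) :=
  match bHeader (rowsOf sheets s) with
  | none => []
  | some h => if (bGap h cols).isEmpty then [] else [(s, bGap h cols)]

def aPiece (sheets : List (String × List (List (String × String)))) (s : String)
    (required : PySem.Set String) : List (String × List String) :=
  match rowsOf sheets s with
  | [] => []
  | row0 :: _ =>
    if (aSheetMissing s required row0).isEmpty then [] else [(s, aSheetMissing s required row0)]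

def aSupportReq : PySem.Set String := PySem.Set.ofList
  ["registerno", "student_email", "faculty_name", "faculty_email", "counsellor_name", "counsellor_email"]

def aSupportPiece (sheets : List (String × List (List (String × String)))) : List (String × List String) :=
  match rowsOf sheets "SupportMapping" with
  | [] => []
  | row0 :: _ =>
    if (PySem.Set.diff aSupportReq (presentOf row0)).isEmpty then []
    else [("SupportMapping", PySem.Set.diff aSupportReq (presentOf row0))]

-- the per-sheet column lists of B's flat table
def colsAdm : List (String × List String) :=
  ["registerno", "Branch", "Batch", "Gender", "AgeBand", "Attempts"].map (fun c => (c, [c]))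
def colsReg : List (String × List String) :=
  ["registerno", "Semester", "FinalStatus"].map (fun c => (c, [c]))
def colsPol : List (String × List String) :=
  ["InstitutionName", "OverallMinPercent", "SubjectMinPercent", "RGradeBelowPercent", "IGradeMinPercent", "IGradeMaxPercent"].map (fun c => (c, [c]))
def colsCat : List (String × List String) :=
  ["InstitutionName", "Branch", "Year", "Semester", "SubjectCode", "SubjectName"].map (fun c => (c, [c]))
def colsAtt : List (String × List String) :=
  [("registerno", ["registerno"]), ("Semester", ["Semester"]),
   ("Overall%", ["Overall%", "OverallPer", "OverallPercent", "OverallAttendancePercent"]),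
   ("Subject%", ["Subject%", "SubjectPer", "SubjectPercent", "SubjectAttendancePercent"]),
   ("SubjectCode or shortname", ["SubjectCode", "SubjectCo", "shortname", "SubjectName", "Subject"])]
def colsSup : List (String × List String) :=
  ["registerno", "student_email", "faculty_name", "faculty_email", "counsellor_name", "counsellor_email"].map (fun c => (c, [c]))

-- --- generic dict lemmas for Dict.mk over raw lists ---
theorem get?_mk_map {ν ν' : Type} (g : ν → ν') :
    ∀ (l : List (String × ν)) (s : String),
      (PySem.Dict.mk (l.map (fun p => (p.1, g p.2)))).get? s = ((PySem.Dict.mk l).get? s).map g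
  | [], s => rfl
  | (k, v) :: l, s => by
    rw [List.map_cons, PySem.Dict.get?_mk_cons, PySem.Dict.get?_mk_cons]
    by_cases h : (k == s) = true
    · simp [h]
    · simp only [Bool.not_eq_true] at h
      simp [h, get?_mk_map g l s]

theorem get?_mk_none {ν : Type} :
    ∀ (l : List (String × ν)) (t : String), (∀ p ∈ l, p.1 ≠ t) → (PySem.Dict.mk l).get? t = none
  | [], _, _ => rfl
  | (k, v) :: l, t, h => by
    rw [PySem.Dict.get?_mk_cons]
    have hk : (k == t) = false := by
      simpa [beq_eq_false_iff_ne] using h (k, v) (by simp)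
    simp [hk, get?_mk_none l t (fun p hp => h p (by simp [hp]))]

theorem get?_mk_append {ν : Type} :
    ∀ (l1 l2 : List (String × ν)) (t : String),
      (PySem.Dict.mk (l1 ++ l2)).get? t = ((PySem.Dict.mk l1).get? t).or ((PySem.Dict.mk l2).get? t)
  | [], l2, t => rfl
  | (k, v) :: l1, l2, t => by
    rw [List.cons_append, PySem.Dict.get?_mk_cons, PySem.Dict.get?_mk_cons]
    by_cases h : (k == t) = true
    · simp [h]
    · simp only [Bool.not_eq_true] at h
      simp [h, get?_mk_append l1 l2 t]

-- B's headers lookup is bHeader of the sheet's rows (first match, like A's .get)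
theorem b_lookup (sheets : List (String × List (List (String × String)))) (s : String) :
    PySem.Dict.getD (bHeaders sheets) s none = bHeader (rowsOf sheets s) := by
  unfold bHeaders rowsOf
  rw [PySem.Dict.getD_eq_get?_getD, PySem.Dict.getD_eq_get?_getD]
  have hit : (PySem.Dict.mk sheets).items = sheets := rfl
  rw [hit, get?_mk_map]
  cases (PySem.Dict.mk sheets).get? s <;> simp [bHeader]

-- condition bridge: header.isdisjoint(aliases) = not any(alias in header)
theorem disj_any (present : PySem.Set String) (as : List String) :
    PySem.Set.isdisjoint present as = !(as.any (fun a => PySem.Set.contains present a)) := by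
  rw [Bool.eq_iff_iff]
  simp only [PySem.Set.isdisjoint, PySem.Set.contains, Bool.not_eq_true',
    List.any_eq_false, List.contains_iff_mem]
  constructor
  · intro h a ha hp
    exact absurd ha (h a hp)
  · intro h x hx ha
    exact absurd hx (h x ha)

theorem mem_items_ne_of_get?_none {ν : Type} :
    ∀ (l : List (String × ν)) (t : String), (PySem.Dict.mk l).get? t = none → ∀ p ∈ l, p.1 ≠ t
  | [], _, _ => by simp
  | (k, v) :: l, t, h => by
    rw [PySem.Dict.get?_mk_cons] at h
    by_cases hk : (k == t) = true
    · simp [hk] at h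
    · simp only [Bool.not_eq_true] at hk
      rw [if_neg (by simp [hk])] at h
      intro p hp
      rcases List.mem_cons.mp hp with rfl | hp
      · simpa [beq_eq_false_iff_ne] using hk
      · exact mem_items_ne_of_get?_none l t h p hp

-- --- B's fold, one sheet segment at a time ---
theorem seg_aux (sheets : List (String × List (List (String × String)))) (s : String)
    (h : PySem.Set String) (hb : bHeader (rowsOf sheets s) = some h)
    (cols : List (String × List String)) :
    ∀ (base : List (String × List String)) (g : List String),
      (∀ p ∈ base, p.1 ≠ s) → (cols.map Prod.fst).Nodup → (∀ c ∈ cols, c.1 ∉ g) →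
      cols.foldl (fun m c => bStep sheets m (s, c.1, c.2)) (PySem.Dict.mk (base ++ [(s, g)]))
        = PySem.Dict.mk (base ++ [(s, g ++ bGap h cols)]) := by
  induction cols with
  | nil => intro base g _ _ _; simp [bGap]
  | cons c cols ih =>
    intro base g hbase hnd hg
    have hnd' : (c.1 :: cols.map Prod.fst).Nodup := by simpa using hnd
    have hget : (PySem.Dict.mk (base ++ [(s, g)])).get? s = some g := by
      rw [get?_mk_append, get?_mk_none base s hbase]
      simp [PySem.Dict.get?_mk_cons]
    have hgd : PySem.Dict.getD (PySem.Dict.mk (base ++ [(s, g)])) s PySem.Set.empty = g := by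
      rw [PySem.Dict.getD_eq_get?_getD, hget]; rfl
    have hcont : (PySem.Dict.mk (base ++ [(s, g)])).contains s = true := by
      rw [PySem.Dict.contains_eq_isSome_get?, hget]; rfl
    have hadd : PySem.Set.add g c.1 = g ++ [c.1] :=
      PySem.Set.add_of_not_mem (hg c (by simp))
    rw [List.foldl_cons]
    have hstep : bStep sheets (PySem.Dict.mk (base ++ [(s, g)])) (s, c.1, c.2)
        = if PySem.Set.isdisjoint h c.2 then
            PySem.Dict.mk (base ++ [(s, g ++ [c.1])])
          else PySem.Dict.mk (base ++ [(s, g)]) := by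
      simp only [bStep, b_lookup, hb]
      by_cases hd : PySem.Set.isdisjoint h c.2 = true
      · rw [if_pos hd, if_pos hd]
        apply PySem.Dict.ext
        rw [PySem.Dict.items_insert_of_contains _ _ hcont, hgd, hadd]
        show (base ++ [(s, g)]).map _ = _
        rw [List.map_append]
        congr 1
        · rw [show base.map (fun p => if (p.1 == s) = true then (s, g ++ [c.1]) else p) = base.map id by
            apply List.map_congr_left; intro p hp
            have : (p.1 == s) = false := by simpa [beq_eq_false_iff_ne] using hbase p hp
            simp [this]]
          simp
        · simp
      · rw [if_neg hd, if_neg hd]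
    rw [hstep]
    by_cases hd : PySem.Set.isdisjoint h c.2 = true
    · rw [if_pos hd]
      rw [ih base (g ++ [c.1]) hbase hnd'.of_cons
          (by
            intro c' hc'
            simp only [List.mem_append, List.mem_singleton]
            rintro (h1 | h1)
            · exact hg c' (by simp [hc']) h1
            · apply (List.nodup_cons.mp hnd').1
              have h2 : c'.1 ∈ cols.map Prod.fst := List.mem_map_of_mem hc'
              rwa [h1] at h2)]
      have hgc : bGap h (c :: cols) = c.1 :: bGap h cols := by
        simp [bGap, hd]
      rw [hgc]
      simp
    · rw [if_neg hd]
      have hgc : bGap h (c :: cols) = bGap h cols := by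
        simp only [Bool.not_eq_true] at hd
        simp [bGap, hd]
      rw [hgc]
      exact ih base g hbase hnd'.of_cons (fun c' hc' => hg c' (by simp [hc']))

theorem seg (sheets : List (String × List (List (String × String)))) (s : String)
    (cols : List (String × List String)) :
    ∀ (m : PySem.Dict String (PySem.Set String)),
      m.get? s = none → (cols.map Prod.fst).Nodup →
      cols.foldl (fun mi c => bStep sheets mi (s, c.1, c.2)) m
        = PySem.Dict.mk (m.items ++ bPiece sheets s cols) := by
  cases hb : bHeader (rowsOf sheets s) with
  | none =>
    intro m _ _
    have : ∀ (l : List (String × List String)) (mi : PySem.Dict String (PySem.Set String)),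
        l.foldl (fun mi c => bStep sheets mi (s, c.1, c.2)) mi = mi := by
      intro l
      induction l with
      | nil => intro mi; rfl
      | cons c l ih =>
        intro mi
        rw [List.foldl_cons, show bStep sheets mi (s, c.1, c.2) = mi by simp [bStep, b_lookup, hb]]
        exact ih mi
    rw [this]
    simp [bPiece, hb]
  | some h =>
    induction cols with
    | nil =>
      intro m _ _
      simp [bPiece, hb, bGap]
    | cons c cols ih =>
      intro m hm hnd
      have hnd' : (c.1 :: cols.map Prod.fst).Nodup := by simpa using hnd
      have hcont : m.contains s = false := by
        rw [PySem.Dict.contains_eq_isSome_get?, hm]; rfl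
      have hgd : PySem.Dict.getD m s PySem.Set.empty = PySem.Set.empty := by
        rw [PySem.Dict.getD_eq_get?_getD, hm]; rfl
      rw [List.foldl_cons]
      have hstep : bStep sheets m (s, c.1, c.2)
          = if PySem.Set.isdisjoint h c.2 then PySem.Dict.mk (m.items ++ [(s, [c.1])]) else m := by
        simp only [bStep, b_lookup, hb]
        by_cases hd : PySem.Set.isdisjoint h c.2 = true
        · rw [if_pos hd, if_pos hd]
          apply PySem.Dict.ext
          rw [PySem.Dict.items_insert_of_not_contains _ _ hcont, hgd]
          rfl
        · rw [if_neg hd, if_neg hd]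
      rw [hstep]
      by_cases hd : PySem.Set.isdisjoint h c.2 = true
      · rw [if_pos hd]
        rw [seg_aux sheets s h hb cols m.items [c.1]
            (mem_items_ne_of_get?_none m.items s hm)
            hnd'.of_cons
            (by
              intro c' hc'
              simp only [List.mem_singleton]
              intro h1
              apply (List.nodup_cons.mp hnd').1
              have h2 : c'.1 ∈ cols.map Prod.fst := List.mem_map_of_mem hc'
              rwa [h1] at h2)]
        have hp : bPiece sheets s (c :: cols) = [(s, c.1 :: bGap h cols)] := by
          simp [bPiece, hb, bGap, hd]
        rw [hp]
        simp
      · rw [if_neg hd]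
        have hp : bPiece sheets s (c :: cols) = bPiece sheets s cols := by
          simp only [Bool.not_eq_true] at hd
          have hf : List.filter (fun c => PySem.Set.isdisjoint h c.2) (c :: cols)
              = List.filter (fun c => PySem.Set.isdisjoint h c.2) cols :=
            List.filter_cons_of_neg (by simp [hd])
          simp only [bPiece, bGap, hb]
          rw [hf]
        rw [ih m hm hnd'.of_cons, hp]

-- --- A's fold as per-sheet pieces ---
theorem foldl_skip_add_eq_filter {α : Type} [BEq α] [LawfulBEq α] (p : α → Bool) :
    ∀ (l acc : List α), l.Nodup → (∀ c ∈ l, c ∉ acc) →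
    List.foldl (fun acc c => if p c then acc else PySem.Set.add acc c) acc l
      = acc ++ l.filter (fun c => !p c)
  | [], acc, _, _ => by simp
  | c :: l, acc, hnd, hacc => by
    have hnd' := List.nodup_cons.mp hnd
    simp only [List.foldl_cons]
    by_cases hp : p c
    · rw [if_pos hp, foldl_skip_add_eq_filter p l acc hnd'.2 (fun d hd => hacc d (by simp [hd]))]
      simp [hp]
    · rw [if_neg hp]
      have hca : PySem.Set.add acc c = acc ++ [c] :=
        PySem.Set.add_of_not_mem (hacc c (by simp))
      rw [hca, foldl_skip_add_eq_filter p l (acc ++ [c]) hnd'.2 (by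
          intro d hd
          simp only [List.mem_append, List.mem_singleton]
          rintro (h | rfl)
          · exact hacc d (by simp [hd]) h
          · exact hnd'.1 hd)]
      simp [hp]

theorem a_decomp (sheets : List (String × List (List (String × String)))) :
    validate_institution_contract_columns_py sheets
      = aPiece sheets "Admissions" (PySem.Set.ofList ["registerno", "Branch", "Batch", "Gender", "AgeBand", "Attempts"])
        ++ (aPiece sheets "Registration" (PySem.Set.ofList ["registerno", "Semester", "FinalStatus"])
        ++ (aPiece sheets "AttendancePolicy" (PySem.Set.ofList ["InstitutionName", "OverallMinPercent", "SubjectMinPercent", "RGradeBelowPercent", "IGradeMinPercent", "IGradeMaxPercent"])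
        ++ (aPiece sheets "SubjectCatalog" (PySem.Set.ofList ["InstitutionName", "Branch", "Year", "Semester", "SubjectCode", "SubjectName"])
        ++ (aPiece sheets "Attendance" (PySem.Set.ofList ["registerno", "Semester", "Overall%", "Subject%"])
        ++ aSupportPiece sheets)))) := by
  unfold validate_institution_contract_columns_py
  have hbody : ∀ (m : List (String × List String)) (sr : String × PySem.Set String),
      (fun (missing : List (String × List String)) (sr : String × PySem.Set String) =>
        match PySem.Dict.getD (PySem.Dict.mk sheets) sr.1 [] with
        | [] => missing
        | row0 :: _ =>
          let mc := aSheetMissing sr.1 sr.2 row0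
          if mc.isEmpty then missing else missing ++ [(sr.1, mc)]) m sr
      = m ++ aPiece sheets sr.1 sr.2 := by
    intro m sr
    unfold aPiece rowsOf
    cases hr : PySem.Dict.getD (PySem.Dict.mk sheets) sr.1 [] with
    | nil => simp [hr]
    | cons row0 _ =>
      by_cases hmc : (aSheetMissing sr.1 sr.2 row0).isEmpty = true <;> simp [hr, hmc]
  rw [PySem.List.foldl_congr_mem aBaseRequired _ (fun m sr => m ++ aPiece sheets sr.1 sr.2) []
      (fun m sr _ => hbody m sr)]
  rw [PySem.List.foldl_append_eq_flatMap (fun sr => aPiece sheets sr.1 sr.2) aBaseRequired []]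
  have hsup : (match PySem.Dict.getD (PySem.Dict.mk sheets) "SupportMapping" [] with
      | [] => ([] : List (String × List String)) ++ List.flatMap (fun sr => aPiece sheets sr.1 sr.2) aBaseRequired
      | row0 :: _ =>
        let present : PySem.Set String :=
          PySem.Set.ofList (((PySem.Dict.mk row0).keys).map PySem.Str.strip)
        let mc := PySem.Set.diff (PySem.Set.ofList
          ["registerno", "student_email", "faculty_name", "faculty_email", "counsellor_name", "counsellor_email"]) present
        if mc.isEmpty then ([] : List (String × List String)) ++ List.flatMap (fun sr => aPiece sheets sr.1 sr.2) aBaseRequired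
        else (([] : List (String × List String)) ++ List.flatMap (fun sr => aPiece sheets sr.1 sr.2) aBaseRequired) ++ [("SupportMapping", mc)])
      = (([] : List (String × List String)) ++ List.flatMap (fun sr => aPiece sheets sr.1 sr.2) aBaseRequired) ++ aSupportPiece sheets := by
    unfold aSupportPiece rowsOf aSupportReq presentOf
    cases hr : PySem.Dict.getD (PySem.Dict.mk sheets) "SupportMapping" [] with
    | nil => simp
    | cons row0 _ =>
      simp
      split_ifs <;> simp
  rw [hsup]
  simp [aBaseRequired, List.flatMap, List.append_assoc]

-- --- B's fold fully decomposed ---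
theorem b_decomp (sheets : List (String × List (List (String × String)))) :
    validate_institution_contract_columns_py_alt sheets
      = bPiece sheets "Admissions" colsAdm
        ++ (bPiece sheets "Registration" colsReg
        ++ (bPiece sheets "AttendancePolicy" colsPol
        ++ (bPiece sheets "SubjectCatalog" colsCat
        ++ (bPiece sheets "Attendance" colsAtt
        ++ bPiece sheets "SupportMapping" colsSup)))) := by
  have hreq : bRequirements
      = colsAdm.map (fun c => ("Admissions", c.1, c.2))
        ++ (colsReg.map (fun c => ("Registration", c.1, c.2))
        ++ (colsPol.map (fun c => ("AttendancePolicy", c.1, c.2))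
        ++ (colsCat.map (fun c => ("SubjectCatalog", c.1, c.2))
        ++ (colsAtt.map (fun c => ("Attendance", c.1, c.2))
        ++ colsSup.map (fun c => ("SupportMapping", c.1, c.2)))))) := by rfl
  have halt : validate_institution_contract_columns_py_alt sheets
      = (bRequirements.foldl (bStep sheets) PySem.Dict.empty).items := rfl
  rw [halt, hreq]
  simp only [List.foldl_append, List.foldl_map]
  have h0 : (PySem.Dict.empty : PySem.Dict String (PySem.Set String)).get? "Admissions" = none := rfl
  rw [seg sheets "Admissions" colsAdm PySem.Dict.empty h0 (by decide)]
  rw [show (PySem.Dict.empty : PySem.Dict String (PySem.Set String)).items = ([] : List (String × List String)) from rfl]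
  have hP : ∀ (l : List (String × List String)) (s : String) (cols : List (String × List String)) (t : String),
      t ≠ s → (PySem.Dict.mk l).get? t = none →
      (PySem.Dict.mk (l ++ bPiece sheets s cols)).get? t = none := by
    intro l s cols t hts hl
    rw [get?_mk_append, hl]
    have : ∀ p ∈ bPiece sheets s cols, p.1 ≠ t := by
      intro p hp
      unfold bPiece at hp
      rcases hpm : bHeader (rowsOf sheets s) with _ | h
      · rw [hpm] at hp; simp at hp
      · rw [hpm] at hp
        by_cases he : (bGap h cols).isEmpty = true
        · simp [he] at hp
        · simp only [Bool.not_eq_true] at he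
          simp only [he] at hp
          simp only [Bool.false_eq_true, if_false, List.mem_singleton] at hp
          subst hp
          exact fun hc => hts hc.symm
    rw [get?_mk_none _ t this]
    rfl
  have hnil : ∀ t : String, (PySem.Dict.mk ([] : List (String × List String))).get? t = none := fun _ => rfl
  have g2 := hP _ "Admissions" colsAdm "Registration" (by decide) (hnil _)
  rw [seg sheets "Registration" colsReg _ g2 (by decide)]
  have g3 := hP _ "Registration" colsReg "AttendancePolicy" (by decide)
    (hP _ "Admissions" colsAdm "AttendancePolicy" (by decide) (hnil _))
  rw [seg sheets "AttendancePolicy" colsPol _ g3 (by decide)]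
  have g4 := hP _ "AttendancePolicy" colsPol "SubjectCatalog" (by decide)
    (hP _ "Registration" colsReg "SubjectCatalog" (by decide)
      (hP _ "Admissions" colsAdm "SubjectCatalog" (by decide) (hnil _)))
  rw [seg sheets "SubjectCatalog" colsCat _ g4 (by decide)]
  have g5 := hP _ "SubjectCatalog" colsCat "Attendance" (by decide)
    (hP _ "AttendancePolicy" colsPol "Attendance" (by decide)
      (hP _ "Registration" colsReg "Attendance" (by decide)
        (hP _ "Admissions" colsAdm "Attendance" (by decide) (hnil _))))
  rw [seg sheets "Attendance" colsAtt _ g5 (by decide)]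
  have g6 := hP _ "Attendance" colsAtt "SupportMapping" (by decide)
    (hP _ "SubjectCatalog" colsCat "SupportMapping" (by decide)
      (hP _ "AttendancePolicy" colsPol "SupportMapping" (by decide)
        (hP _ "Registration" colsReg "SupportMapping" (by decide)
          (hP _ "Admissions" colsAdm "SupportMapping" (by decide) (hnil _)))))
  rw [seg sheets "SupportMapping" colsSup _ g6 (by decide)]
  show (((((([] : List (String × List String))
      ++ bPiece sheets "Admissions" colsAdm)
      ++ bPiece sheets "Registration" colsReg)
      ++ bPiece sheets "AttendancePolicy" colsPol)
      ++ bPiece sheets "SubjectCatalog" colsCat)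
      ++ bPiece sheets "Attendance" colsAtt)
      ++ bPiece sheets "SupportMapping" colsSup = _
  simp [List.append_assoc]

-- --- per-sheet piece equality ---
theorem aSheet_nonatt (s : String) (hs : (s == "Attendance") = false)
    (req : PySem.Set String) (hnd : req.Nodup) (row0 : List (String × String)) :
    aSheetMissing s req row0 = req.filter (fun c => !(PySem.Set.contains (presentOf row0) c)) := by
  unfold aSheetMissing presentOf
  simp only [hs, Bool.false_and, if_false, Bool.false_eq_true]
  rw [foldl_skip_add_eq_filter _ req PySem.Set.empty hnd (by simp [PySem.Set.empty])]
  simp only [PySem.Set.empty, List.nil_append]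
  apply List.filter_congr
  intro c _
  simp [PySem.Set.ofList, PySem.Set.add, PySem.Set.empty, PySem.Set.contains]

theorem bGap_cons (h : PySem.Set String) (x : String × List String) (l : List (String × List String)) :
    bGap h (x :: l) = if PySem.Set.isdisjoint h x.2 then x.1 :: bGap h l else bGap h l := by
  simp only [bGap, List.filter_cons]
  by_cases hd : PySem.Set.isdisjoint h x.2 = true
  · simp [hd]
  · simp only [Bool.not_eq_true] at hd
    simp [hd]

theorem bGap_singles (present : PySem.Set String) :
    ∀ req : List String,
      bGap present (req.map (fun c => (c, [c]))) = req.filter (fun c => !(PySem.Set.contains present c))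
  | [] => rfl
  | c :: req => by
    rw [List.map_cons, bGap_cons, List.filter_cons]
    have hc : PySem.Set.isdisjoint present [c] = !(PySem.Set.contains present c) := by
      rw [disj_any]; simp
    cases hp : PySem.Set.contains present c
    · have hm : c ∉ present := by
        intro hmem
        rw [(PySem.Set.contains_iff present c).mpr hmem] at hp
        exact Bool.true_eq_false.mp hp
      simp [hc, hm, bGap_singles present req]
    · have hm : c ∈ present := (PySem.Set.contains_iff present c).mp hp
      simp [hc, hm, bGap_singles present req]

theorem piece_nonatt (sheets : List (String × List (List (String × String)))) (s : String)
    (hs : (s == "Attendance") = false) (req : List String)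
    (hofl : PySem.Set.ofList req = req) :
    aPiece sheets s (PySem.Set.ofList req) = bPiece sheets s (req.map (fun c => (c, [c]))) := by
  unfold aPiece bPiece
  cases h : rowsOf sheets s with
  | nil => simp [bHeader]
  | cons row0 rest =>
    show _ = (match bHeader (row0 :: rest) with
      | none => []
      | some h => if (bGap h (req.map (fun c => (c, [c])))).isEmpty then []
                  else [(s, bGap h (req.map (fun c => (c, [c]))))])
    simp only [bHeader]
    rw [aSheet_nonatt s hs (PySem.Set.ofList req) (PySem.Set.nodup_ofList req) row0, hofl]
    rw [show bGap (PySem.Set.ofList (((PySem.Dict.mk row0).keys).map PySem.Str.strip)) (req.map (fun c => (c, [c])))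
        = req.filter (fun c => !(PySem.Set.contains (presentOf row0) c)) from bGap_singles _ req]

theorem piece_support (sheets : List (String × List (List (String × String)))) :
    aSupportPiece sheets = bPiece sheets "SupportMapping" colsSup := by
  unfold aSupportPiece bPiece
  cases h : rowsOf sheets "SupportMapping" with
  | nil => simp [bHeader]
  | cons row0 rest =>
    simp only [bHeader]
    have hdiff : PySem.Set.diff aSupportReq (presentOf row0)
        = ["registerno", "student_email", "faculty_name", "faculty_email", "counsellor_name", "counsellor_email"].filter
            (fun c => !(PySem.Set.contains (presentOf row0) c)) := by
      have : aSupportReq = ["registerno", "student_email", "faculty_name", "faculty_email", "counsellor_name", "counsellor_email"] := by decide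
      rw [show PySem.Set.diff aSupportReq (presentOf row0)
          = aSupportReq.filter (fun x => !(PySem.Set.contains (presentOf row0) x)) from rfl, this]
    rw [hdiff, show colsSup = ["registerno", "student_email", "faculty_name", "faculty_email", "counsellor_name", "counsellor_email"].map (fun c => (c, [c])) from rfl,
      bGap_singles]
    rfl

theorem piece_att (sheets : List (String × List (List (String × String)))) :
    aPiece sheets "Attendance" (PySem.Set.ofList ["registerno", "Semester", "Overall%", "Subject%"])
      = bPiece sheets "Attendance" colsAtt := by
  unfold aPiece bPiece
  cases h : rowsOf sheets "Attendance" with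
  | nil => simp [bHeader]
  | cons row0 rest =>
    simp only [bHeader]
    have hmc : aSheetMissing "Attendance" (PySem.Set.ofList ["registerno", "Semester", "Overall%", "Subject%"]) row0
        = bGap (presentOf row0) colsAtt := by
      have e1 : PySem.Dict.getD aAttAliases "registerno" (PySem.Set.ofList ["registerno"]) = ["registerno"] := by decide
      have e2 : PySem.Dict.getD aAttAliases "Semester" (PySem.Set.ofList ["Semester"]) = ["Semester"] := by decide
      have e3 : PySem.Dict.getD aAttAliases "Overall%" (PySem.Set.ofList ["Overall%"])
          = ["Overall%", "OverallPer", "OverallPercent", "OverallAttendancePercent"] := by decide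
      have e4 : PySem.Dict.getD aAttAliases "Subject%" (PySem.Set.ofList ["Subject%"])
          = ["Subject%", "SubjectPer", "SubjectPercent", "SubjectAttendancePercent"] := by decide
      have eu : PySem.Set.union (PySem.Dict.getD aAttAliases "SubjectCode" PySem.Set.empty)
            (PySem.Dict.getD aAttAliases "shortname" PySem.Set.empty)
          = ["SubjectCode", "SubjectCo", "shortname", "SubjectName", "Subject"] := by decide
      have hreq : PySem.Set.ofList ["registerno", "Semester", "Overall%", "Subject%"]
          = ["registerno", "Semester", "Overall%", "Subject%"] := by decide
      unfold aSheetMissing bGap colsAtt presentOf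
      rw [hreq]
      simp only [List.foldl_cons, List.foldl_nil, beq_self_eq_true, if_pos, Bool.true_and,
        List.filter_cons, List.filter_nil, disj_any, e1, e2, e3, e4, eu]
      set P := PySem.Set.ofList (((PySem.Dict.mk row0).keys).map PySem.Str.strip) with hP
      cases h1 : List.any ["registerno"] (fun a => PySem.Set.contains P a) <;>
      cases h2 : List.any ["Semester"] (fun a => PySem.Set.contains P a) <;>
      cases h3 : List.any ["Overall%", "OverallPer", "OverallPercent", "OverallAttendancePercent"] (fun a => PySem.Set.contains P a) <;>
      cases h4 : List.any ["Subject%", "SubjectPer", "SubjectPercent", "SubjectAttendancePercent"] (fun a => PySem.Set.contains P a) <;>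
      cases h5 : List.any ["SubjectCode", "SubjectCo", "shortname", "SubjectName", "Subject"] (fun a => PySem.Set.contains P a) <;>
      decide
    rw [hmc]
    rfl

-- ===== VERDICT (by name: the statement is the Claim_ definition above) =====
theorem validate_institution_contract_columns_py_spec : Claim_equal_validate_institution_contract_columns_py := by
  intro sheets _
  unfold Spec_validate_institution_contract_columns_py
  rw [a_decomp, b_decomp]
  rw [piece_nonatt sheets "Admissions" (by decide) ["registerno", "Branch", "Batch", "Gender", "AgeBand", "Attempts"] (by decide)]
  rw [piece_nonatt sheets "Registration" (by decide) ["registerno", "Semester", "FinalStatus"] (by decide)]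
  rw [piece_nonatt sheets "AttendancePolicy" (by decide) ["InstitutionName", "OverallMinPercent", "SubjectMinPercent", "RGradeBelowPercent", "IGradeMinPercent", "IGradeMaxPercent"] (by decide)]
  rw [piece_nonatt sheets "SubjectCatalog" (by decide) ["InstitutionName", "Branch", "Year", "Semester", "SubjectCode", "SubjectName"] (by decide)]
  rw [piece_att sheets, piece_support sheets]
  rfl
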